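-- pv_equiv track=rewrite | github.com/gnsalok/algo-ds-python | Leetcode-python/Campanies/pattern-patter.py | print_patter
-- ===== SOURCE A (Python) =====
-- def print_patter(s):
--     mini = float('inf')
--     i = 1 # start with 1
--     ans = [i]
--     for c in s:
--         if c == "=":
--             ans.append(i)
--         elif c == "<":
--             i += 1
--             ans.append(i)
--         else:
--             i -= 1
--             ans.append(i)
--         mini = min(mini, i)
--
--     if mini > 0:
--         return max(ans)
--     diff = 1 - mini
--     # adjust each number with diff to make all > 0
--     return max(map(lambda x: x + diff, ans))
-- ===== SOURCE B (Python) =====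
-- def print_patter(s):
--     if not s:
--         return 1
--     def delta(c):
--         return 1 if c == "<" else (0 if c == "=" else -1)
--     def seg(t):
--         # (total delta, max nonempty-prefix sum, min nonempty-prefix sum) of t
--         if len(t) == 1:
--             d = delta(t[0])
--             return (d, d, d)
--         mid = len(t) // 2
--         d1, M1, m1 = seg(t[:mid])
--         d2, M2, m2 = seg(t[mid:])
--         return (d1 + d2, max(M1, d1 + M2), min(m1, d1 + m2))
--     d, M, m = seg(s)
--     mx = max(1, 1 + M)
--     mn = 1 + m
--     return mx if mn > 0 else mx + 1 - mn
-- ===== Notes on version B (the rewrite author's own statement) =====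
-- stated objective: alternative
-- what changed: B replaces A's left-to-right scan that builds the whole ans list and re-scans it with max/map by a divide-and-conquer reduction: each half of the string is summarised as (total delta, max prefix sum, min prefix sum), the two summaries are combined with an associative merge, and the shift is applied once at the end.
import Mathlib
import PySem

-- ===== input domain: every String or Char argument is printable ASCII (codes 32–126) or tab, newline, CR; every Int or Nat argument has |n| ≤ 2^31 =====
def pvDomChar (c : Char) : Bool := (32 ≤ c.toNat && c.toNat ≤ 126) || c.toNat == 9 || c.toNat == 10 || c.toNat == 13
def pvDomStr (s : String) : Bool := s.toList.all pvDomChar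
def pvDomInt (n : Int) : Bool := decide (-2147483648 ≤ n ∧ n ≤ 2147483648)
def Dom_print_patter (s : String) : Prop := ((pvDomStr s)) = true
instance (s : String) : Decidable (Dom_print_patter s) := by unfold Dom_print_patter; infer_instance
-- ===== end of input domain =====

-- B replaces A's linear scan (building the ans list and re-scanning it with max/map) by a
-- divide-and-conquer reduction summarising each half as (delta, max prefix, min prefix)
-- combined with an associative merge (objective: alternative algorithm, same O(n) time).

-- ===== PORT A =====
-- A's loop body; Python's float('inf') initial 'mini' is modelled exactly by
-- Option Int with none = inf (min(inf, i) = i, and inf > 0 is true).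
def printPatterStepA (st : Int × List Int × Option Int) (c : Char) : Int × List Int × Option Int :=
  let (i, ans, mini) := st
  let (i, ans) :=
    if c = '=' then (i, ans ++ [i])
    else if c = '<' then (i + 1, ans ++ [i + 1])
    else (i - 1, ans ++ [i - 1])
  (i, ans, some (match mini with | none => i | some m => min m i))

def print_patter (s : String) : Int :=
  let r := s.toList.foldl printPatterStepA (1, [1], (none : Option Int))
  match r.2.2 with
  | none => (PySem.List.max? r.2.1 (fun x => x)).getD 0  -- ans is nonempty, so getD's default is never used
  | some m =>
    if m > 0 then (PySem.List.max? r.2.1 (fun x => x)).getD 0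
    else (PySem.List.max? (r.2.1.map (fun x => x + (1 - m))) (fun x => x)).getD 0

-- ===== PORT B =====
-- Source B's delta(c)
def pvD (c : Char) : Int := if c = '<' then 1 else if c = '=' then 0 else -1

-- Source B's combination of the two half-summaries
def pvComb (x y : Int × Int × Int) : Int × Int × Int :=
  (x.1 + y.1, max x.2.1 (x.1 + y.2.1), min x.2.2 (x.1 + y.2.2))

-- Source B's seg: divide and conquer on the character list (the [] case is unreachable in Source B)
def segB : List Char → Int × Int × Int
  | [] => (0, 0, 0)
  | [c] => (pvD c, pvD c, pvD c)
  | a :: b :: t =>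
      let l := a :: b :: t
      let k := l.length / 2
      pvComb (segB (l.take k)) (segB (l.drop k))
termination_by l => l.length
decreasing_by all_goals (simp [List.length_take]; omega)

def print_patter_alt (s : String) : Int :=
  let l := s.toList
  if l = [] then 1
  else
    let r := segB l
    let mx := max 1 (1 + r.2.1)
    let mn := 1 + r.2.2
    if mn > 0 then mx else mx + 1 - mn

-- ===== PRECONDITION & SPEC =====
def Spec_print_patter (s : String) (out : Int) : Prop := out = print_patter_alt s
instance (s : String) (out : Int) : Decidable (Spec_print_patter s out) := by unfold Spec_print_patter; infer_instance

-- ===== CLAIM (what is proved, stated in full; the proofs are below) =====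
def Claim_equal_print_patter : Prop := ∀ (s : String), Dom_print_patter s → Spec_print_patter s (print_patter s)

-- ===== LEMMAS AND PROOFS =====

-- proof-side one-pass fold (running value, running max, running min), the bridge
-- between A's list-building fold and B's divide-and-conquer summary
def pvStepMid (st : Int × Int × Option Int) (c : Char) : Int × Int × Option Int :=
  let (v, mx, mn) := st
  let v := if c = '<' then v + 1 else if c ≠ '=' then v - 1 else v
  let mx := if v > mx then v else mx
  let mn := match mn with | none => some v | some m => if v < m then some v else some m
  (v, mx, mn)

def pvMidResult (s : String) : Int :=
  let r := s.toList.foldl pvStepMid (1, 1, (none : Option Int))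
  match r.2.2 with
  | none => r.2.1
  | some m => if m > 0 then r.2.1 else r.2.1 + 1 - m

-- linear characterisation of segB
def pvLinStep (st : Int × Int × Int) (c : Char) : Int × Int × Int :=
  pvComb st (pvD c, pvD c, pvD c)

def pvLin : List Char → Int × Int × Int
  | [] => (0, 0, 0)
  | c :: t => t.foldl pvLinStep (pvD c, pvD c, pvD c)

-- running max commutes with a uniform shift
theorem foldl_max_add (t : List Int) (a d : Int) :
    (t.map (fun x => x + d)).foldl max (a + d) = t.foldl max a + d := by
  induction t generalizing a with
  | nil => rfl
  | cons x t ih =>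
    simp only [List.map_cons, List.foldl_cons]
    rw [max_add_add_right]
    exact ih _

-- the value A pushes / pvStepMid computes for character c from current value v
def pvStepVal (c : Char) (v : Int) : Int :=
  if c = '<' then v + 1 else if c ≠ '=' then v - 1 else v

-- the common running-min update (none = not yet set / inf)
def pvMinUpd (mn : Option Int) (w : Int) : Option Int :=
  some (match mn with | none => w | some m => min m w)

theorem stepA_eq (c : Char) (v a : Int) (t : List Int) (mn : Option Int) :
    printPatterStepA (v, a :: t, mn) c
      = (pvStepVal c v, a :: (t ++ [pvStepVal c v]), pvMinUpd mn (pvStepVal c v)) := by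
  simp only [printPatterStepA, pvStepVal, pvMinUpd]
  by_cases h1 : c = '='
  · simp [h1]
  · by_cases h2 : c = '<' <;> simp [h1, h2]

theorem stepMid_eq (c : Char) (v a : Int) (t : List Int) (mn : Option Int) :
    pvStepMid (v, t.foldl max a, mn) c
      = (pvStepVal c v, (t ++ [pvStepVal c v]).foldl max a, pvMinUpd mn (pvStepVal c v)) := by
  simp only [pvStepMid, pvStepVal, pvMinUpd]
  refine Prod.ext rfl (Prod.ext ?_ ?_)
  · set w : Int := if c = '<' then v + 1 else if c ≠ '=' then v - 1 else v
    show (if w > t.foldl max a then w else t.foldl max a) = (t ++ [w]).foldl max a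
    rw [List.foldl_append]
    simp only [List.foldl_cons, List.foldl_nil]
    rcases max_cases (t.foldl max a) w with ⟨h, h'⟩ | ⟨h, h'⟩ <;> (rw [h]; split <;> omega)
  · set w : Int := if c = '<' then v + 1 else if c ≠ '=' then v - 1 else v
    cases mn with
    | none => rfl
    | some m =>
      show (if w < m then some w else some m) = some (min m w)
      rcases min_cases m w with ⟨h, h'⟩ | ⟨h, h'⟩ <;> rw [h] <;> split <;> (try rfl) <;> omega

-- loop invariant: A's state (v, a :: t, mn) corresponds to the mid state (v, t.foldl max a, mn)
theorem print_patter_loop (l : List Char) (v a : Int) (t : List Int) (mn : Option Int) :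
    ∃ t', l.foldl printPatterStepA (v, a :: t, mn) =
      ((l.foldl pvStepMid (v, t.foldl max a, mn)).1, a :: t',
       (l.foldl pvStepMid (v, t.foldl max a, mn)).2.2)
      ∧ t'.foldl max a = (l.foldl pvStepMid (v, t.foldl max a, mn)).2.1 := by
  induction l generalizing v a t mn with
  | nil => exact ⟨t, rfl, rfl⟩
  | cons c l ih =>
    simp only [List.foldl_cons]
    rw [stepA_eq, stepMid_eq]
    exact ih _ _ _ _

-- A equals the one-pass bridge
theorem print_patter_eq_mid (s : String) : print_patter s = pvMidResult s := by
  unfold print_patter pvMidResult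
  obtain ⟨t', h1, h2⟩ := print_patter_loop s.toList 1 1 [] none
  simp only [List.foldl_nil] at h1 h2
  rw [h1]
  simp only []
  cases hmn : (s.toList.foldl pvStepMid (1, 1, none)).2.2 with
  | none =>
    simp only [PySem.List.max?_id_cons, Option.getD_some, h2]
  | some m =>
    by_cases hm : m > 0
    · simp [hm, PySem.List.max?_id_cons, h2]
    · simp only [hm, List.map_cons, PySem.List.max?_id_cons, Option.getD_some]
      rw [foldl_max_add t' 1 (1 - m), h2]
      simp only [if_false]
      ring

-- pvComb is associative
theorem pvComb_assoc (x y z : Int × Int × Int) :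
    pvComb (pvComb x y) z = pvComb x (pvComb y z) := by
  simp only [pvComb]
  refine Prod.ext ?_ (Prod.ext ?_ ?_)
  · ring
  · show max (max x.2.1 (x.1 + y.2.1)) (x.1 + y.1 + z.2.1)
        = max x.2.1 (x.1 + max y.2.1 (y.1 + z.2.1))
    simp only [max_def]; split_ifs <;> omega
  · show min (min x.2.2 (x.1 + y.2.2)) (x.1 + y.1 + z.2.2)
        = min x.2.2 (x.1 + min y.2.2 (y.1 + z.2.2))
    simp only [min_def]; split_ifs <;> omega

theorem foldl_comb (t : List Char) (x y : Int × Int × Int) :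
    t.foldl pvLinStep (pvComb x y) = pvComb x (t.foldl pvLinStep y) := by
  induction t generalizing y with
  | nil => rfl
  | cons c t ih =>
    simp only [List.foldl_cons, pvLinStep]
    rw [pvComb_assoc]
    exact ih _

theorem pvLin_append (a b : List Char) (ha : a ≠ []) (hb : b ≠ []) :
    pvLin (a ++ b) = pvComb (pvLin a) (pvLin b) := by
  obtain ⟨c, t, rfl⟩ := List.exists_cons_of_ne_nil ha
  obtain ⟨c2, t2, rfl⟩ := List.exists_cons_of_ne_nil hb
  show pvLin (c :: (t ++ c2 :: t2)) = _
  simp only [pvLin, List.foldl_append, List.foldl_cons]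
  show t2.foldl pvLinStep (pvLinStep _ c2) = _
  rw [show pvLinStep (t.foldl pvLinStep (pvD c, pvD c, pvD c)) c2
        = pvComb (t.foldl pvLinStep (pvD c, pvD c, pvD c)) (pvD c2, pvD c2, pvD c2) from rfl]
  exact foldl_comb _ _ _

-- segB computes the linear summary
theorem segB_eq_lin : ∀ (l : List Char), l ≠ [] → segB l = pvLin l
  | [], h => absurd rfl h
  | [c], _ => by simp [segB, pvLin]
  | a :: b :: t, _ => by
    rw [segB]
    have hlen : (a :: b :: t).length = t.length + 2 := by simp
    have hk1 : 1 ≤ (a :: b :: t).length / 2 := by omega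
    have hk2 : (a :: b :: t).length / 2 < (a :: b :: t).length := by omega
    have hta : (a :: b :: t).take ((a :: b :: t).length / 2) ≠ [] := by
      intro h
      have := congrArg List.length h
      simp only [List.length_take, List.length_nil] at this
      omega
    have htd : (a :: b :: t).drop ((a :: b :: t).length / 2) ≠ [] := by
      intro h
      have := congrArg List.length h
      simp only [List.length_drop, List.length_nil] at this
      omega
    rw [segB_eq_lin _ hta, segB_eq_lin _ htd, ← pvLin_append _ _ hta htd,
        List.take_append_drop]
termination_by l => l.length
decreasing_by
  all_goals simp [List.length_take]; omega

-- pvStepMid written with max / pvMinUpd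
theorem pvStepMid_def (v mx : Int) (mn : Option Int) (c : Char) :
    pvStepMid (v, mx, mn) c = (pvStepVal c v, max mx (pvStepVal c v), pvMinUpd mn (pvStepVal c v)) := by
  simp only [pvStepMid, pvStepVal, pvMinUpd]
  set w : Int := if c = '<' then v + 1 else if c ≠ '=' then v - 1 else v
  refine Prod.ext rfl (Prod.ext ?_ ?_)
  · show (if w > mx then w else mx) = max mx w
    rw [max_def]; split_ifs <;> omega
  · cases mn with
    | none => rfl
    | some m =>
      show (if w < m then some w else some m) = some (min m w)
      rw [min_def]; split_ifs <;> (try rfl) <;> omega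

theorem pvStepVal_shift (c : Char) (v : Int) : pvStepVal c v = v + pvD c := by
  simp only [pvStepVal, pvD, ne_eq]
  split_ifs <;> omega

-- one step of the bridge fold matches one pvLinStep through the affine translation
theorem mid_lin_step (c : Char) (st : Int × Int × Int) :
    pvStepMid (1 + st.1, max 1 (1 + st.2.1), some (1 + st.2.2)) c
      = (1 + (pvLinStep st c).1, max 1 (1 + (pvLinStep st c).2.1),
         some (1 + (pvLinStep st c).2.2)) := by
  obtain ⟨d, M, m⟩ := st
  rw [pvStepMid_def, pvStepVal_shift]
  simp only [pvLinStep, pvComb]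
  refine Prod.ext (by ring) (Prod.ext ?_ ?_)
  · show max (max 1 (1 + M)) (1 + d + pvD c) = max 1 (1 + max M (d + pvD c))
    simp only [max_def]; split_ifs <;> omega
  · show pvMinUpd (some (1 + m)) (1 + d + pvD c) = some (1 + min m (d + pvD c))
    simp only [pvMinUpd, min_def, Option.some.injEq]
    split_ifs <;> omega

theorem mid_fold_lin (t : List Char) (st : Int × Int × Int) :
    t.foldl pvStepMid (1 + st.1, max 1 (1 + st.2.1), some (1 + st.2.2))
      = (1 + (t.foldl pvLinStep st).1, max 1 (1 + (t.foldl pvLinStep st).2.1),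
         some (1 + (t.foldl pvLinStep st).2.2)) := by
  induction t generalizing st with
  | nil => rfl
  | cons c t ih =>
    simp only [List.foldl_cons]
    rw [mid_lin_step]
    exact ih _

theorem mid_first_step (c : Char) :
    pvStepMid (1, 1, (none : Option Int)) c
      = (1 + pvD c, max 1 (1 + pvD c), some (1 + pvD c)) := by
  rw [pvStepMid_def, pvStepVal_shift]
  refine Prod.ext (by ring) (Prod.ext (by ring_nf) rfl)

theorem fold_mid_lin (c : Char) (t : List Char) :
    (c :: t).foldl pvStepMid (1, 1, (none : Option Int))
      = (1 + (pvLin (c :: t)).1, max 1 (1 + (pvLin (c :: t)).2.1),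
         some (1 + (pvLin (c :: t)).2.2)) := by
  rw [List.foldl_cons, mid_first_step]
  simpa [pvLin] using mid_fold_lin t (pvD c, pvD c, pvD c)

theorem mid_eq_alt (s : String) : pvMidResult s = print_patter_alt s := by
  unfold pvMidResult print_patter_alt
  cases hl : s.toList with
  | nil => rfl
  | cons c t =>
    have hne : (c :: t : List Char) ≠ [] := by simp
    rw [fold_mid_lin]
    simp [segB_eq_lin _ hne, hne]

-- ===== VERDICT (by name: the statement is the Claim_ definition above) =====
theorem print_patter_spec : Claim_equal_print_patter := by
  intro s _
  unfold Spec_print_patter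
  rw [print_patter_eq_mid, mid_eq_alt]
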